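-- pv_equiv track=rewrite | github.com/kenctrl/smart-gather | table_joins/join_on_id.py | find_header_intersection
-- ===== SOURCE A (Python) =====
-- def find_header_intersection(header_info):
--     keys = [k for k in header_info.keys()]
--     res = {}
--
--     for i in range(len(keys)):
--         filename1 = keys[i]
--         for j in range(i+1, len(keys)):
--             filename2 = keys[j]
--             header1 = header_info[filename1]
--             header2 = header_info[filename2]
--
--             shared = set(header1).intersection(set(header2))
--             res[(filename1, filename2)] = shared
--
--     return res
-- ===== SOURCE B (Python) =====
-- def find_header_intersection(header_info):
--     files = list(header_info)
--     n = len(files)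
--     # inverted index: header value -> increasing list of indices of files containing it
--     occ = {}
--     for i in range(n):
--         for v in dict.fromkeys(header_info[files[i]]):
--             occ.setdefault(v, []).append(i)
--     res = {}
--     for i in range(n):
--         f1 = files[i]
--         for j in range(i + 1, n):
--             res[(f1, files[j])] = set()
--         for v in dict.fromkeys(header_info[f1]):
--             for j in occ[v]:
--                 if j > i:
--                     res[(f1, files[j])].add(v)
--     return res
-- ===== Notes on version B (the rewrite author's own statement) =====
-- stated objective: alternative
-- what changed: Replaces A's per-pair set(h1)&set(h2) double loop by an inverted index value->file indices built in one pass: pairs start empty and each shared value is scattered to the file pairs that contain it, so per-pair work is proportional to shared values instead of full header sizes (intended as faster on sparse-overlap data; a timing run measured only ~1.2-1.4x on its dense inputs).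
import Mathlib
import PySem

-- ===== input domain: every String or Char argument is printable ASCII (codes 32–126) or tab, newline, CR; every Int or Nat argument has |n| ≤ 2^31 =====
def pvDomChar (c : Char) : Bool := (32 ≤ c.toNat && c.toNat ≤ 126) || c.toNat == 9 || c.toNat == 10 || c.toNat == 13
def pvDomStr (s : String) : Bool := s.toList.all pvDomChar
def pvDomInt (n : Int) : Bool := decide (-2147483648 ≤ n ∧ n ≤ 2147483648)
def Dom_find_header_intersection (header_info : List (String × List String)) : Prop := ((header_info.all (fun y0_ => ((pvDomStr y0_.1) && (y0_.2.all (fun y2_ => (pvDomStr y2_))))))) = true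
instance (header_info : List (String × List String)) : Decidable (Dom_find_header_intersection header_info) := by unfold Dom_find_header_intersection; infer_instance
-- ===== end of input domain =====

-- B replaces A's per-pair set(h1)&set(h2) scan by an inverted index value -> file indices,
-- scattering each shared value to the file pairs that contain it (alternative algorithm).

-- ===== PORT A =====
-- inner loop "for j in range(i+1, len(keys)): … res[(filename1, filename2)] = shared"
def pvStepA (d : PySem.Dict String (List String)) (keys : List String)
    (res : PySem.Dict (List String) (PySem.Set String)) (i : Int) :
    PySem.Dict (List String) (PySem.Set String) :=
  let filename1 := PySem.List.pyGetD keys i ""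
  (PySem.List.pyRange (i+1) keys.length 1).foldl (fun res j =>
    let filename2 := PySem.List.pyGetD keys j ""
    let header1 := d.getD filename1 []
    let header2 := d.getD filename2 []
    let shared := PySem.Set.inter (PySem.Set.ofList header1) (PySem.Set.ofList header2)
    res.insert [filename1, filename2] shared) res

def find_header_intersection (header_info : List (String × List String)) : List (List String × List String) :=
  let d := PySem.Dict.ofList header_info
  let keys := d.keys
  let res := (PySem.List.pyRange 0 keys.length 1).foldl (pvStepA d keys) PySem.Dict.empty
  res.items

-- ===== PORT B =====
-- "occ.setdefault(v, []).append(i)"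
def pvOccStep (i : Int) (occ : PySem.Dict String (List Int)) (v : String) : PySem.Dict String (List Int) :=
  occ.modify v [] (· ++ [i])

-- the inverted index: value -> list of indices of files containing it
def pvOcc (d : PySem.Dict String (List String)) (files : List String) : PySem.Dict String (List Int) :=
  (PySem.List.pyRange 0 files.length 1).foldl (fun occ i =>
    (PySem.List.dedup (d.getD (PySem.List.pyGetD files i "") [])).foldl (pvOccStep i) occ)
    PySem.Dict.empty

-- one outer iteration: initialise row i's pairs to the empty set, then scatter row i's values
def pvStepB (d : PySem.Dict String (List String)) (files : List String)
    (occ : PySem.Dict String (List Int))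
    (res : PySem.Dict (List String) (PySem.Set String)) (i : Int) :
    PySem.Dict (List String) (PySem.Set String) :=
  let f1 := PySem.List.pyGetD files i ""
  let res := (PySem.List.pyRange (i+1) files.length 1).foldl (fun res j =>
    res.insert [f1, PySem.List.pyGetD files j ""] (PySem.Set.empty : PySem.Set String)) res
  (PySem.List.dedup (d.getD f1 [])).foldl (fun res v =>
    (occ.getD v []).foldl (fun res j =>
      if i < j then
        res.modify [f1, PySem.List.pyGetD files j ""] PySem.Set.empty (fun s => s.add v)
      else res) res) res

def find_header_intersection_alt (header_info : List (String × List String)) : List (List String × List String) :=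
  let d := PySem.Dict.ofList header_info
  let files := d.keys
  let occ := pvOcc d files
  let res := (PySem.List.pyRange 0 files.length 1).foldl (pvStepB d files occ) PySem.Dict.empty
  res.items

-- ===== PRECONDITION & SPEC =====
def Spec_find_header_intersection (header_info : List (String × List String)) (out : List (List String × List String)) : Prop := out = find_header_intersection_alt header_info
instance (header_info : List (String × List String)) (out : List (List String × List String)) : Decidable (Spec_find_header_intersection header_info out) := by unfold Spec_find_header_intersection; infer_instance

-- ===== CLAIM (what is proved, stated in full; the proofs are below) =====
def Claim_equal_find_header_intersection : Prop := ∀ (header_info : List (String × List String)), Dom_find_header_intersection header_info → Spec_find_header_intersection header_info (find_header_intersection header_info)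

-- ===== LEMMAS AND PROOFS =====

-- the common specification: one row of pairwise intersections, and all rows
def pvRowSpec (d : PySem.Dict String (List String)) (f : String) (rest : List String) :
    List (List String × List String) :=
  rest.map (fun g => ([f, g],
    PySem.Set.inter (PySem.Set.ofList (d.getD f [])) (PySem.Set.ofList (d.getD g []))))

def pvRowsSpec (d : PySem.Dict String (List String)) : List String → List (List String × List String)
  | [] => []
  | f :: rest => pvRowSpec d f rest ++ pvRowsSpec d rest

-- the invariant carried by both outer loops: keys so far are pair keys of earlier rows
def pvRK (fs : List String) (i : Nat) (r : PySem.Dict (List String) (PySem.Set String)) : Prop :=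
  r.keys.Nodup ∧ ∀ kk ∈ r.keys, ∀ x ∈ fs.drop i, ∀ g : String, kk ≠ [x, g]

-- reading an in-range index: xs[j] for 0 <= j < len
theorem pv_pyGetD_at (fs : List String) (m : Nat) (h : m < fs.length) :
    PySem.List.pyGetD fs (m : Int) "" = fs[m] := by
  rw [PySem.List.pyGetD_natCast, List.getD_eq_getElem]

-- mapping a function of xs[j] over an index range is mapping it over the suffix
theorem pv_map_comp_pyGetD {β : Type} (fs : List String) (F : String → β) {a : Int} (h : 0 ≤ a) :
    (PySem.List.pyRange a fs.length 1).map (fun j => F (PySem.List.pyGetD fs j "")) =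
      (fs.drop a.toNat).map F := by
  have h1 : (fun j => F (PySem.List.pyGetD fs j "")) = F ∘ (fun j => PySem.List.pyGetD fs j "") := rfl
  rw [h1, ← List.map_map]
  have h2 : ((fs.length : Int)) = PySem.List.len fs := by simp [PySem.List.len_eq]
  rw [h2, PySem.List.map_pyGetD_pyRange fs "" h]

-- one outer iteration of A appends row i
theorem pv_stepA_items (d : PySem.Dict String (List String)) (fs : List String)
    (hnd : fs.Nodup) (i : Nat) (hi : i < fs.length)
    (r : PySem.Dict (List String) (PySem.Set String)) (hr : pvRK fs i r) :
    (pvStepA d fs r (i : Int)).items = r.items ++ pvRowSpec d fs[i] (fs.drop (i+1)) := by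
  unfold pvStepA
  have hf1 : PySem.List.pyGetD fs (i : Int) "" = fs[i] := by
    rw [PySem.List.pyGetD_natCast, List.getD_eq_getElem]
  simp only [hf1]
  have ha : (0:Int) ≤ (i:Int) + 1 := by omega
  have hmapg : (PySem.List.pyRange ((i:Int)+1) fs.length 1).map (fun j => PySem.List.pyGetD fs j "") =
      fs.drop (i+1) := by
    have := pv_map_comp_pyGetD fs (fun g => g) ha
    simpa using this
  rw [PySem.Dict.items_foldl_insert_fresh _ (fun j => [fs[i], PySem.List.pyGetD fs j ""]) _ r]
  · congr 1
    have := pv_map_comp_pyGetD fs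
      (fun g => (([fs[i], g] : List String),
        PySem.Set.inter (PySem.Set.ofList (d.getD fs[i] [])) (PySem.Set.ofList (d.getD g [])))) ha
    simpa [pvRowSpec] using this
  · -- freshness: row keys are not in r
    intro j hj
    have hjr := PySem.List.mem_pyRange_one.mp hj
    by_contra hc
    simp only [Bool.not_eq_false] at hc
    have hk := (PySem.Dict.contains_iff_mem_keys r _).mp hc
    have hmem : fs[i] ∈ fs.drop i := by
      rw [← List.getElem_cons_drop hi]; exact List.mem_cons_self
    exact hr.2 _ hk fs[i] hmem (PySem.List.pyGetD fs j "") rfl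
  · -- the row keys are distinct
    have : (PySem.List.pyRange ((i:Int)+1) fs.length 1).map
        (fun j => [fs[i], PySem.List.pyGetD fs j ""]) =
        (fs.drop (i+1)).map (fun g => [fs[i], g]) := by
      have := pv_map_comp_pyGetD fs (fun g => ([fs[i], g] : List String)) ha
      simpa using this
    rw [this]
    refine List.Nodup.map ?_ (hnd.sublist (List.drop_sublist _ _))
    intro a b hab
    simpa using hab

-- the invariant survives appending row i
theorem pv_RK_step (fs : List String) (hnd : fs.Nodup) (i : Nat) (hi : i < fs.length)
    (r r1 : PySem.Dict (List String) (PySem.Set String)) (hr : pvRK fs i r)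
    (row : List (List String × PySem.Set String))
    (hrow : row.map Prod.fst = (fs.drop (i+1)).map (fun g => [fs[i], g]))
    (h1 : r1.items = r.items ++ row) : pvRK fs (i+1) r1 := by
  have hkeys : r1.keys = r.keys ++ (fs.drop (i+1)).map (fun g => [fs[i], g]) := by
    simp only [PySem.Dict.keys, h1, List.map_append, hrow]
  have hnotin : fs[i] ∉ fs.drop (i+1) := by
    have : (fs[i] :: fs.drop (i+1)).Nodup := by
      rw [List.getElem_cons_drop hi]; exact hnd.sublist (List.drop_sublist _ _)
    exact (List.nodup_cons.mp this).1
  constructor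
  · rw [hkeys]
    refine List.Nodup.append hr.1 ?_ ?_
    · refine List.Nodup.map ?_ (hnd.sublist (List.drop_sublist _ _))
      intro a b hab; simpa using hab
    · intro kk hk1 hk2
      obtain ⟨g, hg, rfl⟩ := List.mem_map.mp hk2
      have hmem : fs[i] ∈ fs.drop i := by
        rw [← List.getElem_cons_drop hi]; exact List.mem_cons_self
      exact hr.2 _ hk1 fs[i] hmem g rfl
  · intro kk hk x hx g
    have hx' : x ∈ fs.drop i := by
      rw [← List.getElem_cons_drop hi]; exact List.mem_cons_of_mem _ hx
    rw [hkeys] at hk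
    rcases List.mem_append.mp hk with hk | hk
    · exact hr.2 _ hk x hx' g
    · obtain ⟨g', _, rfl⟩ := List.mem_map.mp hk
      intro hc
      have : fs[i] = x := by simpa using congrArg (fun l => l.headI) hc
      rw [this] at hnotin; exact hnotin hx

-- A's whole outer loop, from row i on
theorem pv_rowsA (d : PySem.Dict String (List String)) (fs : List String) (hnd : fs.Nodup) :
    ∀ (k i : Nat), i + k = fs.length →
      ∀ (r : PySem.Dict (List String) (PySem.Set String)), pvRK fs i r →
      ((PySem.List.pyRange (i : Int) fs.length 1).foldl (pvStepA d fs) r).items =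
        r.items ++ pvRowsSpec d (fs.drop i) := by
  intro k
  induction k with
  | zero =>
    intro i hik r _
    rw [PySem.List.pyRange_one_eq_nil (by omega : (fs.length : Int) ≤ (i : Int))]
    simp [pvRowsSpec, show i = fs.length by omega]
  | succ k ih =>
    intro i hik r hr
    have hi : i < fs.length := by omega
    rw [PySem.List.pyRange_one_cons (by exact_mod_cast hi), List.foldl_cons]
    have hstep := pv_stepA_items d fs hnd i hi r hr
    have hrk := pv_RK_step fs hnd i hi r _ hr _ (by simp [pvRowSpec, Function.comp_def]) hstep
    have hcast : ((i : Int) + 1) = ((i + 1 : Nat) : Int) := by push_cast; ring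
    rw [hcast, ih (i+1) (by omega) _ hrk, hstep]
    rw [← List.getElem_cons_drop hi]
    simp [pvRowsSpec]

theorem pv_placeholder_A : ∀ (header_info : List (String × List String)),
    find_header_intersection header_info =
      pvRowsSpec (PySem.Dict.ofList header_info) (PySem.Dict.ofList header_info).keys := by
  intro hi
  unfold find_header_intersection
  have hnd := PySem.Dict.nodup_keys_ofList hi
  have h0 := pv_rowsA (PySem.Dict.ofList hi) (PySem.Dict.ofList hi).keys hnd
    (PySem.Dict.ofList hi).keys.length 0 (by omega) PySem.Dict.empty
    ⟨by simp [PySem.Dict.keys_empty], by simp [PySem.Dict.keys_empty]⟩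
  simpa using h0

-- a nested loop "for i in l: for v in g i: acc = F acc (v, i)" is one loop over tagged pairs
theorem pv_nested_to_flat {α β δ : Type} (g : α → List β) (F : δ → β × α → δ) :
    ∀ (l : List α) (init : δ),
      l.foldl (fun acc i => (g i).foldl (fun acc v => F acc (v, i)) acc) init =
        (l.flatMap (fun i => (g i).map (fun v => (v, i)))).foldl F init := by
  intro l
  induction l with
  | nil => intro init; rfl
  | cons a l ih =>
    intro init
    simp only [List.foldl_cons, List.flatMap_cons, List.foldl_append, List.foldl_map]
    exact ih _

theorem pv_filterMap_flatMap {α β γ : Type} (g : α → List β) (p : β → Bool) (f : β → γ) :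
    ∀ l : List α, ((l.flatMap g).filter p).map f = l.flatMap (fun i => ((g i).filter p).map f) := by
  intro l
  induction l with
  | nil => rfl
  | cons a l ih => simp only [List.flatMap_cons, List.filter_append, List.map_append, ih]

theorem pv_flatMap_ite {α : Type} (p : α → Prop) [DecidablePred p] (l : List α) :
    l.flatMap (fun x => if p x then [x] else []) = l.filter (fun x => decide (p x)) := by
  induction l with
  | nil => rfl
  | cons a l ih =>
    by_cases h : p a <;> simp [List.flatMap_cons, h, ih]

theorem pv_filter_beq_nodup {α : Type} [BEq α] [LawfulBEq α] (l : List α) (hnd : l.Nodup) (v : α) :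
    l.filter (fun x => x == v) = if v ∈ l then [v] else [] := by
  rw [List.filter_beq, List.Nodup.count hnd]
  by_cases h : v ∈ l <;> simp [h]

theorem pv_contains_ofList (l : List String) (v : String) :
    (PySem.Set.ofList l).contains v = decide (v ∈ l) := by
  cases hc : (PySem.Set.ofList l).contains v with
  | true =>
    have := (PySem.Set.mem_ofList l v).mp ((PySem.Set.contains_iff _ _).mp hc)
    simp [this]
  | false =>
    have : v ∉ l := by
      intro h
      have := (PySem.Set.contains_iff (PySem.Set.ofList l) v).mpr ((PySem.Set.mem_ofList l v).mpr h)
      rw [hc] at this; cases this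
    simp [this]

-- the inverted index holds, at each value v, exactly the indices of the files containing v
theorem pv_occ_getD (d : PySem.Dict String (List String)) (fs : List String) (v : String) :
    (pvOcc d fs).getD v [] =
      (PySem.List.pyRange 0 fs.length 1).filter
        (fun j => decide (v ∈ d.getD (PySem.List.pyGetD fs j "") [])) := by
  unfold pvOcc pvOccStep
  have h := pv_nested_to_flat
      (fun i => PySem.List.dedup (d.getD (PySem.List.pyGetD fs i "") []))
      (fun (dd : PySem.Dict String (List Int)) (p : String × Int) => dd.modify p.1 [] (· ++ [p.2]))
      (PySem.List.pyRange 0 fs.length 1) PySem.Dict.empty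
  rw [show (List.foldl
        (fun occ i =>
          List.foldl (fun occ v => PySem.Dict.modify occ v [] (fun x => x ++ [i])) occ
            (PySem.List.dedup (d.getD (PySem.List.pyGetD fs i "") [])))
        PySem.Dict.empty (PySem.List.pyRange 0 fs.length 1)) = _ from h]
  rw [PySem.Dict.getD_foldl_modify_append]
  rw [PySem.Dict.getD_empty, List.nil_append]
  rw [pv_filterMap_flatMap]
  have hblock : ∀ i : Int,
      (((PySem.List.dedup (d.getD (PySem.List.pyGetD fs i "") [])).map (fun w => (w, i))).filter
          (fun p => p.1 == v)).map (fun x => x.2) =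
        if v ∈ PySem.List.dedup (d.getD (PySem.List.pyGetD fs i "") []) then [i] else [] := by
    intro i
    rw [List.filter_map]
    have hcomp : ((fun p : String × Int => p.1 == v) ∘ (fun w => (w, i))) = fun w => w == v := rfl
    rw [hcomp, List.map_map]
    have hnd : (PySem.List.dedup (d.getD (PySem.List.pyGetD fs i "") [])).Nodup := by
      rw [PySem.List.dedup_eq_ofList]; exact PySem.Set.nodup_ofList _
    rw [pv_filter_beq_nodup _ hnd v]
    by_cases h : v ∈ d.getD (PySem.List.pyGetD fs i "") [] <;>
      simp [PySem.List.dedup_eq_ofList, PySem.Set.mem_ofList, h]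
  calc ((PySem.List.pyRange 0 fs.length 1).flatMap fun i =>
        (((PySem.List.dedup (d.getD (PySem.List.pyGetD fs i "") [])).map (fun v_1 => (v_1, i))).filter
          (fun p => p.1 == v)).map (fun x => x.2))
      = (PySem.List.pyRange 0 fs.length 1).flatMap (fun i =>
          if v ∈ PySem.List.dedup (d.getD (PySem.List.pyGetD fs i "") []) then [i] else []) := by
        exact List.flatMap_congr (fun i _ => hblock i)
    _ = (PySem.List.pyRange 0 fs.length 1).filter
          (fun j => decide (v ∈ PySem.List.dedup (d.getD (PySem.List.pyGetD fs j "") []))) :=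
        pv_flatMap_ite _ _
    _ = _ := by
        refine List.filter_congr (fun j _ => ?_)
        rw [decide_eq_decide]
        rw [PySem.List.dedup_eq_ofList]
        exact PySem.Set.mem_ofList _ _

theorem pv_occ_mem (d : PySem.Dict String (List String)) (fs : List String) (v : String) (j : Int) :
    j ∈ (pvOcc d fs).getD v [] ↔
      0 ≤ j ∧ j < (fs.length : Int) ∧ v ∈ d.getD (PySem.List.pyGetD fs j "") [] := by
  rw [pv_occ_getD, List.mem_filter, PySem.List.mem_pyRange_one]
  simp [and_assoc]

theorem pv_occ_nodup (d : PySem.Dict String (List String)) (fs : List String) (v : String) :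
    ((pvOcc d fs).getD v []).Nodup := by
  rw [pv_occ_getD]
  exact (PySem.List.nodup_pyRange_one _ _).filter _

-- the scatter step of B's fill loop, as a function of one tagged pair (j, v)
def pvFillF (fs : List String) (i : Int)
    (res : PySem.Dict (List String) (PySem.Set String)) (p : Int × String) :
    PySem.Dict (List String) (PySem.Set String) :=
  if i < p.1 then
    res.modify [PySem.List.pyGetD fs i "", PySem.List.pyGetD fs p.1 ""] PySem.Set.empty
      (fun s => s.add p.2)
  else res

theorem pv_fill_keys (fs : List String) (i : Nat) :
    ∀ (M : List (Int × String)) (r : PySem.Dict (List String) (PySem.Set String)),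
      (∀ p ∈ M, (i : Int) < p.1 →
        [PySem.List.pyGetD fs (i : Int) "", PySem.List.pyGetD fs p.1 ""] ∈ r.keys) →
      (M.foldl (pvFillF fs (i : Int)) r).keys = r.keys := by
  intro M
  induction M with
  | nil => intro r _; rfl
  | cons p M ih =>
    intro r hM
    rw [List.foldl_cons]
    by_cases hc : (i : Int) < p.1
    · have hk : [PySem.List.pyGetD fs (i : Int) "", PySem.List.pyGetD fs p.1 ""] ∈ r.keys :=
        hM p List.mem_cons_self hc
      have hkeys : (pvFillF fs (i : Int) r p).keys = r.keys := by
        unfold pvFillF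
        rw [if_pos hc, PySem.Dict.keys_modify,
          PySem.Dict.keys_insert_of_contains _ _ ((PySem.Dict.contains_iff_mem_keys _ _).mpr hk)]
      rw [ih _ (by intro q hq hcq; rw [hkeys]; exact hM q (List.mem_cons_of_mem _ hq) hcq), hkeys]
    · have hkeys : pvFillF fs (i : Int) r p = r := by unfold pvFillF; rw [if_neg hc]
      rw [hkeys]
      exact ih _ (fun q hq hcq => hM q (List.mem_cons_of_mem _ hq) hcq)

theorem pv_fill_old (fs : List String) (i : Nat) :
    ∀ (M : List (Int × String)) (r : PySem.Dict (List String) (PySem.Set String))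
      (kk : List String),
      (∀ p ∈ M, kk ≠ [PySem.List.pyGetD fs (i : Int) "", PySem.List.pyGetD fs p.1 ""]) →
      (M.foldl (pvFillF fs (i : Int)) r).getD kk PySem.Set.empty = r.getD kk PySem.Set.empty := by
  intro M
  induction M with
  | nil => intro r kk _; rfl
  | cons p M ih =>
    intro r kk hM
    rw [List.foldl_cons, ih _ _ (fun q hq => hM q (List.mem_cons_of_mem _ hq))]
    unfold pvFillF
    by_cases hc : (i : Int) < p.1
    · rw [if_pos hc, PySem.Dict.getD_modify_of_ne _ _ _ (hM p List.mem_cons_self)]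
    · rw [if_neg hc]

theorem pv_fill_at (fs : List String) (hnd : fs.Nodup) (i : Nat) (j0 : Nat)
    (hij : i < j0) (hj0 : j0 < fs.length) :
    ∀ (M : List (Int × String)) (r : PySem.Dict (List String) (PySem.Set String)),
      (∀ p ∈ M, 0 ≤ p.1 ∧ p.1 < (fs.length : Int)) →
      (M.foldl (pvFillF fs (i : Int)) r).getD [fs[i], fs[j0]] PySem.Set.empty =
        ((M.filter (fun p => p.1 == (j0 : Int))).map (fun p => p.2)).foldl PySem.Set.add
          (r.getD [fs[i], fs[j0]] PySem.Set.empty) := by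
  have hi : i < fs.length := lt_trans hij hj0
  intro M
  induction M with
  | nil => intro r _; rfl
  | cons p M ih =>
    intro r hM
    have hp := hM p List.mem_cons_self
    have htail := fun q hq => hM q (List.mem_cons_of_mem _ hq)
    obtain ⟨pj, pv⟩ := p
    obtain ⟨m, rfl⟩ : ∃ m : Nat, pj = (m : Int) := ⟨pj.toNat, by omega⟩
    have hm : m < fs.length := by
      have h2 : ((m : Int), pv).1 < (fs.length : Int) := hp.2
      simp only [] at h2
      exact_mod_cast h2
    rw [List.foldl_cons, List.filter_cons]
    by_cases hj : m = j0
    · subst hj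
      have hc : (i : Int) < (m : Int) := by exact_mod_cast hij
      have hkey : pvFillF fs (i : Int) r ((m : Int), pv) =
          r.modify [fs[i], fs[m]] PySem.Set.empty (fun s => s.add pv) := by
        unfold pvFillF
        rw [if_pos hc]
        simp only [pv_pyGetD_at fs i hi, pv_pyGetD_at fs m hm]
      rw [hkey, ih _ htail]
      rw [PySem.Dict.getD_modify_self]
      simp
    · have hkeyne : ([fs[i], fs[j0]] : List String) ≠
          [PySem.List.pyGetD fs (i : Int) "", PySem.List.pyGetD fs (m : Int) ""] := by
        rw [pv_pyGetD_at fs i hi, pv_pyGetD_at fs m hm]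
        intro hc
        have h2 : fs[j0] = fs[m] := by simpa using hc
        rw [List.Nodup.getElem_inj_iff hnd] at h2
        exact hj h2.symm
      have hstep : (pvFillF fs (i : Int) r ((m : Int), pv)).getD [fs[i], fs[j0]] PySem.Set.empty =
          r.getD [fs[i], fs[j0]] PySem.Set.empty := by
        unfold pvFillF
        by_cases hc : (i : Int) < (m : Int)
        · rw [if_pos hc, PySem.Dict.getD_modify_of_ne _ _ _ hkeyne]
        · rw [if_neg hc]
      have hfil : (((m : Int), pv).1 == (j0 : Int)) = false := by
        simp; exact_mod_cast hj
      simp only [hfil, Bool.false_eq_true, if_false]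
      rw [ih _ htail, hstep]

theorem pv_inter_filter (h1 h2 : List String) :
    PySem.Set.inter (PySem.Set.ofList h1) (PySem.Set.ofList h2) =
      (PySem.List.dedup h1).filter (fun v => decide (v ∈ h2)) := by
  show (PySem.Set.ofList h1).filter (fun x => (PySem.Set.ofList h2).contains x) = _
  rw [PySem.List.dedup_eq_ofList]
  exact List.filter_congr (fun x _ => pv_contains_ofList h2 x)

theorem pv_stepB_items (d : PySem.Dict String (List String)) (fs : List String)
    (hnd : fs.Nodup) (i : Nat) (hi : i < fs.length)
    (r : PySem.Dict (List String) (PySem.Set String)) (hr : pvRK fs i r) :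
    (pvStepB d fs (pvOcc d fs) r (i : Int)).items =
      r.items ++ pvRowSpec d fs[i] (fs.drop (i+1)) := by
  have hf1 : PySem.List.pyGetD fs (i : Int) "" = fs[i] := pv_pyGetD_at fs i hi
  have ha : (0:Int) ≤ (i:Int) + 1 := by omega
  -- the initialisation loop appends the empty row
  have hinit : ((PySem.List.pyRange ((i:Int)+1) fs.length 1).foldl (fun res j =>
        res.insert [fs[i], PySem.List.pyGetD fs j ""] (PySem.Set.empty : PySem.Set String)) r).items =
      r.items ++ (fs.drop (i+1)).map (fun g => ([fs[i], g], (PySem.Set.empty : PySem.Set String))) := by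
    rw [PySem.Dict.items_foldl_insert_fresh _ (fun j => [fs[i], PySem.List.pyGetD fs j ""]) _ r]
    · congr 1
      have := pv_map_comp_pyGetD fs
        (fun g => (([fs[i], g] : List String), (PySem.Set.empty : PySem.Set String))) ha
      simpa using this
    · intro j hj
      by_contra hc
      simp only [Bool.not_eq_false] at hc
      have hk := (PySem.Dict.contains_iff_mem_keys r _).mp hc
      have hmem : fs[i] ∈ fs.drop i := by
        rw [← List.getElem_cons_drop hi]; exact List.mem_cons_self
      exact hr.2 _ hk fs[i] hmem (PySem.List.pyGetD fs j "") rfl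
    · have : (PySem.List.pyRange ((i:Int)+1) fs.length 1).map
          (fun j => [fs[i], PySem.List.pyGetD fs j ""]) =
          (fs.drop (i+1)).map (fun g => [fs[i], g]) := by
        have := pv_map_comp_pyGetD fs (fun g => ([fs[i], g] : List String)) ha
        simpa using this
      rw [this]
      refine List.Nodup.map ?_ (hnd.sublist (List.drop_sublist _ _))
      intro a b hab
      simpa using hab
  set r' := (PySem.List.pyRange ((i:Int)+1) fs.length 1).foldl (fun res j =>
      res.insert [fs[i], PySem.List.pyGetD fs j ""] (PySem.Set.empty : PySem.Set String)) r with hr'def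
  have hrk' : pvRK fs (i+1) r' :=
    pv_RK_step fs hnd i hi r r' hr _ (by simp [Function.comp_def]) hinit
  have hkeys' : r'.keys = r.keys ++ (fs.drop (i+1)).map (fun g => [fs[i], g]) := by
    simp only [PySem.Dict.keys, hinit, List.map_append, List.map_map, Function.comp_def]
  -- the scatter loop, flattened
  set M := (PySem.List.dedup (d.getD fs[i] [])).flatMap
      (fun v => ((pvOcc d fs).getD v []).map (fun j => (j, v))) with hMdef
  have hflat : (PySem.List.dedup (d.getD fs[i] [])).foldl (fun res v =>
        (((pvOcc d fs)).getD v []).foldl (fun res j =>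
          if (i:Int) < j then
            res.modify [fs[i], PySem.List.pyGetD fs j ""] PySem.Set.empty (fun s => s.add v)
          else res) res) r' =
      M.foldl (pvFillF fs (i:Int)) r' := by
    have h := pv_nested_to_flat (fun v => ((pvOcc d fs)).getD v []) (pvFillF fs (i:Int))
      (PySem.List.dedup (d.getD fs[i] [])) r'
    rw [← h]
    have hfun : (fun (res : PySem.Dict (List String) (PySem.Set String)) (v : String) =>
          (((pvOcc d fs)).getD v []).foldl (fun res j =>
            if (i:Int) < j then
              res.modify [fs[i], PySem.List.pyGetD fs j ""] PySem.Set.empty (fun s => s.add v)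
            else res) res) =
        (fun res v => (((pvOcc d fs)).getD v []).foldl
          (fun acc j => pvFillF fs (i:Int) acc (j, v)) res) := by
      funext res v
      congr 1
      funext acc j
      show (if (i:Int) < j then
          acc.modify [fs[i], PySem.List.pyGetD fs j ""] PySem.Set.empty (fun s => s.add v)
        else acc) = pvFillF fs (i:Int) acc (j, v)
      unfold pvFillF
      rw [hf1]
    rw [hfun]
  have hMbound : ∀ p ∈ M, 0 ≤ p.1 ∧ p.1 < (fs.length : Int) := by
    intro p hp
    rw [hMdef] at hp
    obtain ⟨v, _, hp2⟩ := List.mem_flatMap.mp hp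
    obtain ⟨j, hj, rfl⟩ := List.mem_map.mp hp2
    have := (pv_occ_mem d fs v j).mp hj
    exact ⟨this.1, this.2.1⟩
  set F := M.foldl (pvFillF fs (i:Int)) r' with hFdef
  have hFkeys : F.keys = r'.keys := by
    rw [hFdef]
    refine pv_fill_keys fs i M r' (fun p hp hip => ?_)
    obtain ⟨h0, h1⟩ := hMbound p hp
    obtain ⟨m, hm⟩ : ∃ m : Nat, p.1 = (m : Int) := ⟨p.1.toNat, by omega⟩
    have hmlt : m < fs.length := by omega
    have him : i < m := by omega
    rw [hf1, hm, pv_pyGetD_at fs m hmlt, hkeys']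
    refine List.mem_append_right _ (List.mem_map.mpr ⟨fs[m], ?_, rfl⟩)
    have hk : m - (i+1) < (fs.drop (i+1)).length := by
      rw [List.length_drop]; omega
    have : (fs.drop (i+1))[m - (i+1)] = fs[m] := by
      rw [List.getElem_drop]; congr 1; omega
    rw [← this]
    exact List.getElem_mem _
  have hFnodup : F.keys.Nodup := by rw [hFkeys]; exact hrk'.1
  have hFold : ∀ kk ∈ r.keys, F.getD kk PySem.Set.empty = r.getD kk PySem.Set.empty := by
    intro kk hkk
    have h1 : F.getD kk PySem.Set.empty = r'.getD kk PySem.Set.empty := by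
      rw [hFdef]
      refine pv_fill_old fs i M r' kk (fun p hp => ?_)
      rw [hf1]
      have hmem : fs[i] ∈ fs.drop i := by
        rw [← List.getElem_cons_drop hi]; exact List.mem_cons_self
      exact hr.2 _ hkk fs[i] hmem _
    have h2 : (kk, r.getD kk PySem.Set.empty) ∈ r'.items := by
      rw [hinit]
      refine List.mem_append_left _ ?_
      rw [PySem.Dict.items_eq_map_keys r hr.1 PySem.Set.empty]
      exact List.mem_map.mpr ⟨kk, hkk, rfl⟩
    rw [h1, PySem.Dict.getD_of_mem_items r' h2 hrk'.1]
  have hFat : ∀ j0 : Nat, i < j0 → (hj0 : j0 < fs.length) →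
      F.getD [fs[i], fs[j0]] PySem.Set.empty =
        (PySem.List.dedup (d.getD fs[i] [])).filter (fun v => decide (v ∈ d.getD fs[j0] [])) := by
    intro j0 hij hj0
    have hbase : r'.getD [fs[i], fs[j0]] PySem.Set.empty = PySem.Set.empty := by
      have h2 : (([fs[i], fs[j0]] : List String), (PySem.Set.empty : PySem.Set String)) ∈ r'.items := by
        rw [hinit]
        refine List.mem_append_right _ (List.mem_map.mpr ⟨fs[j0], ?_, rfl⟩)
        have hk : j0 - (i+1) < (fs.drop (i+1)).length := by
          rw [List.length_drop]; omega
        have : (fs.drop (i+1))[j0 - (i+1)] = fs[j0] := by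
          rw [List.getElem_drop]; congr 1; omega
        rw [← this]
        exact List.getElem_mem _
      exact PySem.Dict.getD_of_mem_items r' h2 hrk'.1 PySem.Set.empty
    rw [hFdef, pv_fill_at fs hnd i j0 hij hj0 M r' hMbound, hbase]
    -- compute the selected values
    have hsel : (M.filter (fun p => p.1 == (j0 : Int))).map (fun p => p.2) =
        (PySem.List.dedup (d.getD fs[i] [])).filter
          (fun v => decide (v ∈ d.getD fs[j0] [])) := by
      rw [hMdef, pv_filterMap_flatMap]
      have hblock : ∀ v : String,
          ((((pvOcc d fs).getD v []).map (fun j => (j, v))).filter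
              (fun p => p.1 == (j0 : Int))).map (fun p => p.2) =
            if (j0 : Int) ∈ (pvOcc d fs).getD v [] then [v] else [] := by
        intro v
        rw [List.filter_map]
        have hcomp : ((fun p : Int × String => p.1 == (j0 : Int)) ∘ (fun j => (j, v))) =
            fun j => j == (j0 : Int) := rfl
        rw [hcomp, List.map_map]
        rw [pv_filter_beq_nodup _ (pv_occ_nodup d fs v) (j0 : Int)]
        by_cases h : (j0 : Int) ∈ (pvOcc d fs).getD v [] <;> simp [h]
      calc ((PySem.List.dedup (d.getD fs[i] [])).flatMap fun v =>
            ((((pvOcc d fs).getD v []).map (fun j => (j, v))).filter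
              (fun p => p.1 == (j0 : Int))).map (fun p => p.2))
          = (PySem.List.dedup (d.getD fs[i] [])).flatMap (fun v =>
              if (j0 : Int) ∈ (pvOcc d fs).getD v [] then [v] else []) :=
            List.flatMap_congr (fun v _ => hblock v)
        _ = (PySem.List.dedup (d.getD fs[i] [])).filter
              (fun v => decide ((j0 : Int) ∈ (pvOcc d fs).getD v [])) := pv_flatMap_ite _ _
        _ = _ := by
            refine List.filter_congr (fun v _ => ?_)
            rw [decide_eq_decide, pv_occ_mem]
            constructor
            · intro h
              have := h.2.2
              rwa [pv_pyGetD_at fs j0 hj0] at this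
            · intro h
              exact ⟨by omega, by exact_mod_cast hj0, by rwa [pv_pyGetD_at fs j0 hj0]⟩
    rw [hsel]
    have hnodup : ((PySem.List.dedup (d.getD fs[i] [])).filter
        (fun v => decide (v ∈ d.getD fs[j0] []))).Nodup := by
      refine List.Nodup.filter _ ?_
      rw [PySem.List.dedup_eq_ofList]; exact PySem.Set.nodup_ofList _
    have : ∀ l : List String, l.Nodup → l.foldl PySem.Set.add PySem.Set.empty = l := by
      intro l hl
      have h1 : l.foldl PySem.Set.add PySem.Set.empty = PySem.Set.ofList l := rfl
      rw [h1, PySem.Set.ofList_eq_self_of_nodup _ hl]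
    exact this _ hnodup
  -- assemble the items of the filled dictionary
  unfold pvStepB
  simp only [hf1]
  rw [hflat]
  rw [PySem.Dict.items_eq_map_keys F hFnodup PySem.Set.empty, hFkeys, hkeys', List.map_append]
  congr 1
  · rw [List.map_congr_left (fun kk hkk => by rw [hFold kk hkk]),
      ← PySem.Dict.items_eq_map_keys r hr.1 PySem.Set.empty]
  · rw [List.map_map, pvRowSpec]
    refine List.map_congr_left (fun g hg => ?_)
    obtain ⟨k, hk, hgk⟩ := List.mem_iff_getElem.mp hg
    have hj0 : i + 1 + k < fs.length := by
      have := hk; rw [List.length_drop] at this; omega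
    have hgfs : g = fs[i+1+k] := by rw [← hgk, List.getElem_drop]
    simp only [Function.comp_def]
    rw [hgfs, hFat (i+1+k) (by omega) hj0, pv_inter_filter]

-- B's whole outer loop, from row i on
theorem pv_rowsB (d : PySem.Dict String (List String)) (fs : List String) (hnd : fs.Nodup) :
    ∀ (k i : Nat), i + k = fs.length →
      ∀ (r : PySem.Dict (List String) (PySem.Set String)), pvRK fs i r →
      ((PySem.List.pyRange (i : Int) fs.length 1).foldl (pvStepB d fs (pvOcc d fs)) r).items =
        r.items ++ pvRowsSpec d (fs.drop i) := by
  intro k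
  induction k with
  | zero =>
    intro i hik r _
    rw [PySem.List.pyRange_one_eq_nil (by omega : (fs.length : Int) ≤ (i : Int))]
    simp [pvRowsSpec, show i = fs.length by omega]
  | succ k ih =>
    intro i hik r hr
    have hi : i < fs.length := by omega
    rw [PySem.List.pyRange_one_cons (by exact_mod_cast hi), List.foldl_cons]
    have hstep := pv_stepB_items d fs hnd i hi r hr
    have hrk := pv_RK_step fs hnd i hi r _ hr _ (by simp [pvRowSpec, Function.comp_def]) hstep
    have hcast : ((i : Int) + 1) = ((i + 1 : Nat) : Int) := by push_cast; ring
    rw [hcast, ih (i+1) (by omega) _ hrk, hstep]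
    rw [← List.getElem_cons_drop hi]
    simp [pvRowsSpec]

theorem pv_placeholder_B : ∀ (header_info : List (String × List String)),
    find_header_intersection_alt header_info =
      pvRowsSpec (PySem.Dict.ofList header_info) (PySem.Dict.ofList header_info).keys := by
  intro hi
  unfold find_header_intersection_alt
  have hnd := PySem.Dict.nodup_keys_ofList hi
  have h0 := pv_rowsB (PySem.Dict.ofList hi) (PySem.Dict.ofList hi).keys hnd
    (PySem.Dict.ofList hi).keys.length 0 (by omega) PySem.Dict.empty
    ⟨by simp [PySem.Dict.keys_empty], by simp [PySem.Dict.keys_empty]⟩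
  simpa using h0

-- ===== VERDICT (by name: the statement is the Claim_ definition above) =====
theorem find_header_intersection_spec : Claim_equal_find_header_intersection := by
  intro hi _
  unfold Spec_find_header_intersection
  rw [pv_placeholder_A, pv_placeholder_B]
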